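-- pv_equiv track=rewrite | github.com/Chris0010/bayesian-statistics-the-fun-way | Part I: Introduction to Probability/measuringuncertainty.py | two_dice
-- ===== SOURCE A (Python) =====
-- def two_dice(sides, num):
--     n = 0
--     m = 0
--     for i in range(1, sides+1):
--         for j in range(1, sides+1):
--             if i+j > num:
--                 n += 1
--                 m = i*j
--     return "The probability of two {}-sided dice rolling a value greater than {} is {}/{}".format(sides, num, n, m)
-- ===== SOURCE B (Python) =====
-- def two_dice(sides, num):
--     # O(1): closed-form count via inclusion-exclusion on the complement
--     # (pairs with i+j <= num), using triangular numbers; the last pair A's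
--     # scan hits is always (sides, sides), so m = sides*sides when n > 0.
--     def P(x):
--         y = max(x, 0)
--         return y * (y + 1) // 2
--     if sides <= 0:
--         n = 0
--     else:
--         n = sides * sides - (P(num - 1) - 2 * P(num - 1 - sides) + P(num - 1 - 2 * sides))
--     m = sides * sides if n > 0 else 0
--     return "The probability of two {}-sided dice rolling a value greater than {} is {}/{}".format(sides, num, n, m)
-- ===== Notes on version B (the rewrite author's own statement) =====
-- stated objective: faster
-- what changed: Replaced the O(sides^2) nested scan by an O(1) closed form: inclusion-exclusion with triangular numbers counts pairs with i+j>num, and m is sides*sides whenever n>0 since A's last hit is always (sides,sides).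
import Mathlib
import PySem

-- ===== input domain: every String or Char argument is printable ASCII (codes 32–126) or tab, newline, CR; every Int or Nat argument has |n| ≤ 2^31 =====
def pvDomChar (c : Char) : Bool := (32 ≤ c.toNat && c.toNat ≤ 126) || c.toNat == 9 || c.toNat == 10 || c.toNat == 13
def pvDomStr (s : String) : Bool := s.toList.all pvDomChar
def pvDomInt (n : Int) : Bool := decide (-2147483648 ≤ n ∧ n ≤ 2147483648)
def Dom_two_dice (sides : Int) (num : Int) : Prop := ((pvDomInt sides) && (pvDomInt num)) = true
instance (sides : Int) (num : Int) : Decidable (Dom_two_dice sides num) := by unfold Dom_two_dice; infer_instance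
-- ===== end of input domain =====

-- B replaces A's O(sides^2) double loop by an O(1) closed-form count (inclusion-exclusion
-- with triangular numbers) and the observation that A's last hit is (sides, sides) (objective: faster).

-- ===== PORT A =====
def two_dice (sides : Int) (num : Int) : String :=
  let r : Int × Int :=
    (PySem.List.pyRange 1 (sides + 1) 1).foldl (fun (p : Int × Int) i =>
      (PySem.List.pyRange 1 (sides + 1) 1).foldl (fun (q : Int × Int) j =>
        if i + j > num then (q.1 + 1, i * j) else q) p) (0, 0)
  "The probability of two " ++ PySem.Int.toStr sides ++
    "-sided dice rolling a value greater than " ++ PySem.Int.toStr num ++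
    " is " ++ PySem.Int.toStr r.1 ++ "/" ++ PySem.Int.toStr r.2

-- ===== PORT B =====
-- Source B's helper P: triangular number of max(x,0)   (the '//' is PySem.Int.floordiv)
def pvP (x : Int) : Int :=
  let y := max x 0
  PySem.Int.floordiv (y * (y + 1)) 2

def two_dice_alt (sides : Int) (num : Int) : String :=
  let n : Int :=
    if sides ≤ 0 then 0
    else sides * sides - (pvP (num - 1) - 2 * pvP (num - 1 - sides) + pvP (num - 1 - 2 * sides))
  let m : Int := if n > 0 then sides * sides else 0
  "The probability of two " ++ PySem.Int.toStr sides ++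
    "-sided dice rolling a value greater than " ++ PySem.Int.toStr num ++
    " is " ++ PySem.Int.toStr n ++ "/" ++ PySem.Int.toStr m

-- ===== PRECONDITION & SPEC =====
def Spec_two_dice (sides : Int) (num : Int) (out : String) : Prop := out = two_dice_alt sides num
instance (sides : Int) (num : Int) (out : String) : Decidable (Spec_two_dice sides num out) := by unfold Spec_two_dice; infer_instance

-- ===== CLAIM (what is proved, stated in full; the proofs are below) =====
def Claim_equal_two_dice : Prop := ∀ (sides : Int) (num : Int), Dom_two_dice sides num → Spec_two_dice sides num (two_dice sides num)

-- ===== LEMMAS AND PROOFS =====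

-- the number of j ∈ [1,s] with i + j > num (A's inner-loop increment for row i)
def pvRow (s num i : Int) : Int := s - min (max (num - i) 0) s

-- partial sums of pvRow over i = 1..t
def pvS (s num : Int) : Nat → Int
  | 0 => 0
  | t + 1 => pvS s num t + pvRow s num ((t : Int) + 1)

theorem two_mul_pvP (x : Int) : 2 * pvP x = max x 0 * (max x 0 + 1) := by
  unfold pvP
  obtain ⟨k, hk⟩ : Even (max x 0 * (max x 0 + 1)) := Int.even_mul_succ_self _
  rw [PySem.Int.floordiv_eq_ediv_of_pos (by norm_num)]
  omega

theorem pvP_succ (x : Int) : pvP x = pvP (x - 1) + max x 0 := by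
  have h1 := two_mul_pvP x
  have h2 := two_mul_pvP (x - 1)
  by_cases hx : 1 ≤ x
  · rw [max_eq_left (by omega)] at h1 ⊢
    rw [max_eq_left (by omega)] at h2
    have h3 : x * (x + 1) = (x - 1) * (x - 1 + 1) + 2 * x := by ring
    omega
  · rw [max_eq_right (by omega)] at h1 ⊢
    rw [max_eq_right (by omega)] at h2
    omega

-- A's inner loop over j ∈ range(1, t+1): add the row count, set m to i*t iff the count is positive.
theorem inner_loop_eq (i num : Int) :
    ∀ (t : Nat) (p : Int × Int),
      (PySem.List.pyRange 1 ((t : Int) + 1) 1).foldl (fun (q : Int × Int) j =>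
          if i + j > num then (q.1 + 1, i * j) else q) p
      = (p.1 + pvRow (t : Int) num i,
         if pvRow (t : Int) num i > 0 then i * (t : Int) else p.2) := by
  intro t
  induction t with
  | zero =>
    intro p
    rw [PySem.List.pyRange_one_eq_nil (by norm_num)]
    simp only [List.foldl_nil, Nat.cast_zero]
    have h0 : pvRow 0 num i = 0 := by unfold pvRow; omega
    rw [h0]
    simp
  | succ t ih =>
    intro p
    have hcast : (((t + 1 : Nat)) : Int) = (t : Int) + 1 := by push_cast; ring
    rw [hcast, PySem.List.pyRange_one_succ_right (by omega), List.foldl_append, ih]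
    simp only [List.foldl_cons, List.foldl_nil]
    unfold pvRow
    by_cases hfire : i + ((t : Int) + 1) > num
    · rw [if_pos hfire]
      have hpos : (t : Int) + 1 - min (max (num - i) 0) ((t : Int) + 1) > 0 := by omega
      rw [if_pos hpos]
      simp only [Prod.mk.injEq]
      exact ⟨by omega, trivial⟩
    · have h1 : ¬((t : Int) - min (max (num - i) 0) (t : Int) > 0) := by omega
      have h2 : ¬((t : Int) + 1 - min (max (num - i) 0) ((t : Int) + 1) > 0) := by omega
      rw [if_neg hfire, if_neg h1, if_neg h2]
      simp only [Prod.mk.injEq]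
      exact ⟨by omega, trivial⟩

-- A's outer loop (with the inner loop summarised by pvRow) computes the partial sums pvS,
-- and m = t*s iff the last row fired (rows are monotone in i).
theorem outer_loop_eq (s num : Int) (hs : 0 ≤ s) :
    ∀ (t : Nat),
      (PySem.List.pyRange 1 ((t : Int) + 1) 1).foldl (fun (p : Int × Int) i =>
          (p.1 + pvRow s num i, if pvRow s num i > 0 then i * s else p.2)) (0, 0)
      = (pvS s num t,
         if 0 < pvRow s num (t : Int) ∧ 0 < (t : Int) then (t : Int) * s else 0) := by
  intro t
  induction t with
  | zero =>
    rw [PySem.List.pyRange_one_eq_nil (by norm_num)]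
    simp [pvS]
  | succ t ih =>
    have hcast : (((t + 1 : Nat)) : Int) = (t : Int) + 1 := by push_cast; ring
    rw [hcast, PySem.List.pyRange_one_succ_right (by omega), List.foldl_append, ih]
    simp only [List.foldl_cons, List.foldl_nil, pvS]
    have hmono : pvRow s num (t : Int) ≤ pvRow s num ((t : Int) + 1) := by unfold pvRow; omega
    by_cases hf : pvRow s num ((t : Int) + 1) > 0
    · rw [if_pos hf, if_pos ⟨hf, by omega⟩]
    · have hnot : ¬(0 < pvRow s num (t : Int) ∧ 0 < (t : Int)) := by omega
      rw [if_neg hf, if_neg hnot, if_neg (by omega)]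

-- pvS is positive iff the last row fired (row counts are ≥ 0 and monotone)
theorem pvS_nonneg (s num : Int) : ∀ (t : Nat), 0 ≤ pvS s num t := by
  intro t
  induction t with
  | zero => simp [pvS]
  | succ t ih => simp only [pvS]; unfold pvRow; omega

theorem pvS_pos_iff (s num : Int) (hs : 0 ≤ s) :
    ∀ (t : Nat), 0 < pvS s num t ↔ 0 < pvRow s num (t : Int) ∧ 0 < (t : Int) := by
  intro t
  induction t with
  | zero => simp [pvS]
  | succ t ih =>
    have hcast : (((t + 1 : Nat)) : Int) = (t : Int) + 1 := by push_cast; ring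
    simp only [pvS, hcast]
    have hmono : pvRow s num (t : Int) ≤ pvRow s num ((t : Int) + 1) := by unfold pvRow; omega
    have hnn : 0 ≤ pvRow s num ((t : Int) + 1) := by unfold pvRow; omega
    have hS := pvS_nonneg s num t
    constructor
    · intro h
      by_cases hf : 0 < pvRow s num ((t : Int) + 1)
      · exact ⟨hf, by omega⟩
      · exfalso
        have hS0 : ¬ (0 < pvS s num t) := fun hp => by
          obtain ⟨h1, _⟩ := ih.mp hp; omega
        omega
    · intro ⟨h1, _⟩
      omega

-- closed form for the partial sums, via triangular numbers
theorem pvS_closed (s num : Int) (hs : 0 ≤ s) :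
    ∀ (t : Nat),
      pvS s num t = (t : Int) * s - (pvP (num - 1) - pvP (num - 1 - (t : Int)))
        + (pvP (num - 1 - s) - pvP (num - 1 - s - (t : Int))) := by
  intro t
  induction t with
  | zero => simp [pvS]
  | succ t ih =>
    have hcast : (((t + 1 : Nat)) : Int) = (t : Int) + 1 := by push_cast; ring
    simp only [pvS, hcast, ih]
    have h1 := pvP_succ (num - 1 - (t : Int))
    have h2 := pvP_succ (num - 1 - s - (t : Int))
    have e1 : num - 1 - (t : Int) - 1 = num - 1 - ((t : Int) + 1) := by ring
    have e2 : num - 1 - s - (t : Int) - 1 = num - 1 - s - ((t : Int) + 1) := by ring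
    rw [e1] at h1
    rw [e2] at h2
    have hts : ((t : Int) + 1) * s = (t : Int) * s + s := by ring
    unfold pvRow
    omega

-- ===== VERDICT (by name: the statement is the Claim_ definition above) =====
theorem two_dice_spec : Claim_equal_two_dice := by
  intro sides num _
  simp only [Spec_two_dice, two_dice, two_dice_alt]
  by_cases hs : sides ≤ 0
  · rw [PySem.List.pyRange_one_eq_nil (by omega)]
    simp [hs]
  · obtain ⟨k, rfl⟩ : ∃ k : Nat, sides = (k : Int) := ⟨sides.toNat, (Int.toNat_of_nonneg (by omega)).symm⟩
    have hk0 : (0 : Int) ≤ (k : Int) := by positivity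
    have hfold :
        (PySem.List.pyRange 1 ((k : Int) + 1) 1).foldl (fun (p : Int × Int) i =>
          (PySem.List.pyRange 1 ((k : Int) + 1) 1).foldl (fun (q : Int × Int) j =>
            if i + j > num then (q.1 + 1, i * j) else q) p) (0, 0)
        = (PySem.List.pyRange 1 ((k : Int) + 1) 1).foldl (fun (p : Int × Int) i =>
            (p.1 + pvRow (k : Int) num i, if pvRow (k : Int) num i > 0 then i * (k : Int) else p.2)) (0, 0) := by
      apply PySem.List.foldl_congr_mem
      intro p i _
      rw [inner_loop_eq]
    rw [hfold, outer_loop_eq (k : Int) num hk0 k]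
    have hkpos : ¬ ((k : Int) ≤ 0) := by omega
    have hS := pvS_closed (k : Int) num hk0 k
    have h2s : num - 1 - (k : Int) - (k : Int) = num - 1 - 2 * (k : Int) := by ring
    rw [h2s] at hS
    have hn : pvS (k : Int) num k
        = (k : Int) * (k : Int) - (pvP (num - 1) - 2 * pvP (num - 1 - (k : Int)) + pvP (num - 1 - 2 * (k : Int))) := by
      rw [hS]; ring
    simp only [if_neg hkpos, ← pvS_pos_iff (k : Int) num hk0 k, hn]
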